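-- pv_equiv track=rewrite | github.com/fosslight-oss/if-you-are-rich-then-do-not-solve-algorithm | hello70825/programmers_64061.py | solution
-- ===== SOURCE A (Python) =====
-- def solution(board, moves):
--     n = len(board)
--     m = len(board[0])
--     answer = 0
--
--     stacks = [[] for _ in range(len(board[0]))]
--     for j in range(m):
--         for i in range(n-1, -1, -1):
--             if board[i][j]:
--                 stacks[j].append(board[i][j])
--
--     stack = []
--     for move in moves:
--         if stacks[move-1]:
--             stack.append(stacks[move-1].pop())
--         if len(stack) >= 2 and stack[-1] == stack[-2]:
--             answer += 2
--             stack.pop()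
--             stack.pop()
--
--     return answer
-- ===== SOURCE B (Python) =====
-- def _drop_zeros(col):
--     while col and col[0] == 0:
--         col = col[1:]
--     return col
--
--
-- def solution(board, moves):
--     # lazy top-down column suffixes instead of pre-built reversed stacks
--     cols = [[row[j] for row in board] for j in range(len(board[0]))]
--     answer = 0
--     basket = []
--     for move in moves:
--         col = _drop_zeros(cols[move - 1])
--         if col:
--             item = col[0]
--             cols[move - 1] = col[1:]
--             if basket and basket[-1] == item:
--                 basket.pop()
--                 answer += 2
--             else:
--                 basket.append(item)
--         else:
--             cols[move - 1] = col
--     return answer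
-- ===== Notes on version B (the rewrite author's own statement) =====
-- stated objective: alternative
-- what changed: B drops A's nested pre-build of reversed non-zero per-column stacks and instead keeps lazy top-down column suffixes, skipping leading zeros only when a column is played, and replaces A's push-then-cancel basket step by a conditional cancel-or-push.
import Mathlib
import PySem

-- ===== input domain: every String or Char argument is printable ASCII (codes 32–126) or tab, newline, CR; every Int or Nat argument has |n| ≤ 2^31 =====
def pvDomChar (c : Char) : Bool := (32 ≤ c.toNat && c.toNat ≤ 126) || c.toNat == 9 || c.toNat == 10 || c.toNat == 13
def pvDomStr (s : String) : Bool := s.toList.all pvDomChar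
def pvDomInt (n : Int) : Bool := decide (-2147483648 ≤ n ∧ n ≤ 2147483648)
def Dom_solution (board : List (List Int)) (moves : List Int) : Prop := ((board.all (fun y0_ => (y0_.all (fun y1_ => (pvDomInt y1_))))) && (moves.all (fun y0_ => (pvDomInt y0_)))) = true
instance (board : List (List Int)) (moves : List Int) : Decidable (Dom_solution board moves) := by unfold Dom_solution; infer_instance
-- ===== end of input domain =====

-- B replaces A's eager nested build of reversed non-zero per-column stacks with lazy
-- top-down column suffixes (leading zeros skipped at play time) and a conditional
-- cancel-or-push basket step; equal return value on Pre_ (neither mutates its arguments).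

-- ===== PORT A =====
-- one move of A's second loop: optional pop from the chosen stack, then push-then-cancel
def stepA (s : List (List Int) × List Int × Int) (move : Int) : List (List Int) × List Int × Int :=
  let stks := s.1
  let cur := PySem.List.pyGetD stks (move - 1) []
  let p : List (List Int) × List Int :=
    if cur ≠ [] then
      (PySem.List.pySetD stks (move - 1) cur.dropLast, s.2.1 ++ [cur.getLast?.getD 0])
    else (stks, s.2.1)
  if 2 ≤ p.2.length ∧ PySem.List.pyGetD p.2 (-1) 0 = PySem.List.pyGetD p.2 (-2) 0 then
    (p.1, p.2.dropLast.dropLast, s.2.2 + 2)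
  else (p.1, p.2, s.2.2)

def solution (board : List (List Int)) (moves : List Int) : Int :=
  let n : Int := board.length
  let m : Int := (PySem.List.pyGetD board 0 []).length
  let stks : List (List Int) :=
    (PySem.List.pyRange 0 m 1).map (fun j =>
      (PySem.List.pyRange (n - 1) (-1) (-1)).foldl (fun st i =>
        if PySem.List.pyGetD (PySem.List.pyGetD board i []) j 0 ≠ 0 then
          st ++ [PySem.List.pyGetD (PySem.List.pyGetD board i []) j 0]
        else st) [])
  (moves.foldl stepA (stks, [], 0)).2.2

-- ===== PORT B =====
-- while col and col[0] == 0: col = col[1:]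
def dropZeros : List Int → List Int
  | [] => []
  | x :: xs => if x = 0 then dropZeros xs else x :: xs

-- one move of B's loop: skip leading zeros lazily, then cancel-or-push
def stepB (s : List (List Int) × List Int × Int) (move : Int) : List (List Int) × List Int × Int :=
  let cols := s.1
  let basket := s.2.1
  match dropZeros (PySem.List.pyGetD cols (move - 1) []) with
  | [] => (PySem.List.pySetD cols (move - 1) [], basket, s.2.2)
  | item :: rest =>
    if basket ≠ [] ∧ basket.getLast?.getD 0 = item then
      (PySem.List.pySetD cols (move - 1) rest, basket.dropLast, s.2.2 + 2)
    else
      (PySem.List.pySetD cols (move - 1) rest, basket ++ [item], s.2.2)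

def solution_alt (board : List (List Int)) (moves : List Int) : Int :=
  let m : Int := (PySem.List.pyGetD board 0 []).length
  let cols : List (List Int) :=
    (PySem.List.pyRange 0 m 1).map (fun j => board.map (fun row => PySem.List.pyGetD row j 0))
  (moves.foldl stepB (cols, [], 0)).2.2

-- ===== PRECONDITION & SPEC =====
-- Pre_ excludes exactly the inputs where A raises IndexError: the empty board, boards
-- with a row shorter than row 0, and moves whose 0-based index move-1 falls outside
-- Python's (wraparound-inclusive) index range [-m, m) of the m column stacks.
def Pre_solution (board : List (List Int)) (moves : List Int) : Prop :=
  board ≠ [] ∧ (∀ row ∈ board, (board.headD []).length ≤ row.length) ∧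
    (∀ mv ∈ moves, 1 - ((board.headD []).length : Int) ≤ mv ∧ mv ≤ ((board.headD []).length : Int))
instance (board : List (List Int)) (moves : List Int) : Decidable (Pre_solution board moves) := by
  unfold Pre_solution; infer_instance

def pvWitness_solution : List (List Int) × List Int := ([[0, 1], [2, 3]], [1, 2, 2, 1])

def Spec_solution (board : List (List Int)) (moves : List Int) (out : Int) : Prop := out = solution_alt board moves
instance (board : List (List Int)) (moves : List Int) (out : Int) : Decidable (Spec_solution board moves out) := by unfold Spec_solution; infer_instance

-- ===== CLAIM (what is proved, stated in full; the proofs are below) =====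
def Claim_equal_solution : Prop := ∀ (board : List (List Int)) (moves : List Int), Dom_solution board moves → Pre_solution board moves → Spec_solution board moves (solution board moves)

-- ===== LEMMAS AND PROOFS =====

def colAbs (c : List Int) : List Int := (c.filter (fun x => decide (x ≠ 0))).reverse

lemma dropZeros_filter (c : List Int) :
    (dropZeros c).filter (fun x => decide (x ≠ 0)) = c.filter (fun x => decide (x ≠ 0)) := by
  induction c with
  | nil => rfl
  | cons x xs ih =>
    by_cases h : x = 0
    · simpa [dropZeros, h] using ih
    · simp [dropZeros, h]

lemma dropZeros_head_ne {c : List Int} {item : Int} {rest : List Int}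
    (h : dropZeros c = item :: rest) : item ≠ 0 := by
  induction c with
  | nil => simp [dropZeros] at h
  | cons x xs ih =>
    by_cases hx : x = 0
    · exact ih (by simpa [dropZeros, hx] using h)
    · simp [dropZeros, hx] at h
      omega

lemma colAbs_eq_of_dropZeros {c : List Int} {item : Int} {rest : List Int}
    (h : dropZeros c = item :: rest) : colAbs c = colAbs rest ++ [item] := by
  have hi : item ≠ 0 := dropZeros_head_ne h
  unfold colAbs
  rw [← dropZeros_filter c, h]
  simp [hi]

lemma colAbs_nil_of_dropZeros {c : List Int} (h : dropZeros c = []) : colAbs c = [] := by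
  unfold colAbs
  rw [← dropZeros_filter c, h]
  rfl

lemma set_getElem?_eq {α : Type} {l : List α} {i : Nat} {a : α}
    (h : l[i]? = some a) : l.set i a = l := by
  apply List.ext_getElem?
  intro k
  rcases eq_or_ne k i with rfl | hk
  · have hlt : k < l.length := by
      by_contra hc
      rw [List.getElem?_eq_none (by omega)] at h
      cases h
    rw [List.getElem?_set_self']
    simp [hlt, ← h]
  · simp [List.getElem?_set_ne (Ne.symm hk)]

-- A's top-pair test on basket ++ [item] is exactly B's cancel test
lemma cond_iff (basket : List Int) (item : Int) :
    (2 ≤ (basket ++ [item]).length ∧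
      PySem.List.pyGetD (basket ++ [item]) (-1) 0 = PySem.List.pyGetD (basket ++ [item]) (-2) 0)
    ↔ (basket ≠ [] ∧ basket.getLast?.getD 0 = item) := by
  cases basket using List.reverseRecOn with
  | nil => simp [PySem.List.pyGetD]
  | append_singleton pre y =>
    have hlen : ((pre ++ [y]) ++ [item]).length = pre.length + 2 := by simp
    have hm1 : PySem.List.pyGetD ((pre ++ [y]) ++ [item]) (-1) 0 = item := by
      simp only [PySem.List.pyGetD, PySem.List.pyGet?_neg_one_append_singleton]
      rfl
    have hm2 : PySem.List.pyGetD ((pre ++ [y]) ++ [item]) (-2) 0 = y := by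
      have h := PySem.List.pyGet?_neg_ofNat ((pre ++ [y]) ++ [item]) 2 (by norm_num) (by simp)
      simp only [PySem.List.pyGetD, h]
      have hidx : ((pre ++ [y]) ++ [item]).length - 2 = pre.length := by simp
      rw [hidx, List.append_assoc, List.getElem?_append_right (Nat.le_refl _)]
      simp
    rw [hm1, hm2, hlen]
    constructor
    · rintro ⟨-, h⟩
      exact ⟨by simp, by simp [h.symm]⟩
    · rintro ⟨-, h⟩
      refine ⟨by omega, ?_⟩
      simp only [List.getLast?_concat, Option.getD_some] at h
      exact h.symm

-- on a chain with no two adjacent equal elements A's top-pair test fails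
lemma chain_not_top (basket : List Int) (hch : basket.IsChain (· ≠ ·)) :
    ¬ (2 ≤ basket.length ∧
        PySem.List.pyGetD basket (-1) 0 = PySem.List.pyGetD basket (-2) 0) := by
  cases basket using List.reverseRecOn with
  | nil => simp
  | append_singleton pre x =>
    cases pre using List.reverseRecOn with
    | nil => simp [PySem.List.pyGetD]
    | append_singleton pre2 y =>
      have := (cond_iff (pre2 ++ [y]) x).mp
      intro hc
      have h2 := this hc
      have hne : y ≠ x := by
        have h3 := List.isChain_append.mp hch
        have := h3.2.2 y (by simp) x (by simp)
        exact this
      exact hne (by simpa using h2.2)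

lemma step_eq (cols : List (List Int)) (basket : List Int) (ans move : Int)
    (hmv : 1 - (cols.length : Int) ≤ move ∧ move ≤ (cols.length : Int))
    (hch : basket.IsChain (· ≠ ·)) :
    stepA (cols.map colAbs, basket, ans) move
      = ((stepB (cols, basket, ans) move).1.map colAbs,
         (stepB (cols, basket, ans) move).2.1, (stepB (cols, basket, ans) move).2.2)
    ∧ ((stepB (cols, basket, ans) move).2.1).IsChain (· ≠ ·)
    ∧ (stepB (cols, basket, ans) move).1.length = cols.length := by
  obtain ⟨j, hjidx, hj⟩ : ∃ j : Nat,
      PySem.List.pyIdx? cols.length (move - 1) = some j ∧ j < cols.length := by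
    refine ⟨if 0 ≤ move - 1 then (move - 1).toNat else cols.length - (-(move - 1)).toNat, ?_, ?_⟩
    · unfold PySem.List.pyIdx?
      split_ifs with h0 h1 h2 <;> first | rfl | omega
    · split_ifs <;> omega
  have hjm : j < (cols.map colAbs).length := by simpa using hj
  have hgetB : PySem.List.pyGetD cols (move - 1) [] = cols[j] := by
    simp [PySem.List.pyGetD, PySem.List.pyGet?, hjidx, List.getElem?_eq_getElem hj]
  have hgetA : PySem.List.pyGetD (cols.map colAbs) (move - 1) [] = colAbs cols[j] := by
    simp [PySem.List.pyGetD, PySem.List.pyGet?, hjidx, List.getElem?_eq_getElem hj]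
  have hsetB : ∀ v, PySem.List.pySetD cols (move - 1) v = cols.set j v := by
    intro v
    simp [PySem.List.pySetD, PySem.List.pySet?, hjidx]
  have hsetA : ∀ v, PySem.List.pySetD (cols.map colAbs) (move - 1) v = (cols.map colAbs).set j v := by
    intro v
    simp [PySem.List.pySetD, PySem.List.pySet?, hjidx]
  unfold stepA stepB
  simp only [hgetA, hgetB]
  cases hd : dropZeros cols[j] with
  | nil =>
    have habs : colAbs cols[j] = [] := colAbs_nil_of_dropZeros hd
    rw [habs]
    simp only [ne_eq, not_true_eq_false, if_false]
    rw [if_neg (chain_not_top basket hch)]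
    refine ⟨?_, hch, by simp [hsetB]⟩
    have hcnil : colAbs ([] : List Int) = [] := rfl
    simp only [hsetB, List.map_set, hcnil]
    rw [set_getElem?_eq (by simp [List.getElem?_eq_getElem hjm, List.getElem_map, habs])]
  | cons item rest =>
    have habs : colAbs cols[j] = colAbs rest ++ [item] := colAbs_eq_of_dropZeros hd
    rw [habs]
    have hne : colAbs rest ++ [item] ≠ [] := by simp
    simp only [ne_eq, hne, not_false_eq_true, if_true, List.getLast?_concat,
      Option.getD_some, List.dropLast_concat]
    by_cases hc : basket ≠ [] ∧ basket.getLast?.getD 0 = item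
    · rw [if_pos ((cond_iff basket item).mpr hc), if_pos hc]
      have hdl : basket.dropLast ++ [basket.getLast hc.1] = basket :=
        List.dropLast_append_getLast hc.1
      refine ⟨?_, ?_, by simp [hsetB]⟩
      · simp [hsetA, hsetB, List.map_set]
      · have := (List.isChain_append.mp (hdl ▸ hch)).1
        simpa using this
    · rw [if_neg (fun h => hc ((cond_iff basket item).mp h)), if_neg hc]
      refine ⟨?_, ?_, by simp [hsetB]⟩
      · simp [hsetA, hsetB, List.map_set]
      · refine List.isChain_append.mpr ⟨hch, ?_, ?_⟩
        · simp
        · intro x hx yy hyy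
          simp only [List.head?_cons, Option.mem_def, Option.some.injEq] at hyy
          subst hyy
          rw [not_and_or, not_not] at hc
          rcases eq_or_ne basket [] with rfl | hb
          · simp at hx
          · have := hc.resolve_left hb
            intro hxy
            apply this
            rw [← hxy]
            simp only [Option.mem_def] at hx
            simp [hx]


-- A's initial per-column stack equals colAbs of B's top-down column
lemma init_col_eq (board : List (List Int)) (j : Int) :
    (PySem.List.pyRange ((board.length : Int) - 1) (-1) (-1)).foldl (fun st i =>
        if PySem.List.pyGetD (PySem.List.pyGetD board i []) j 0 ≠ 0 then
          st ++ [PySem.List.pyGetD (PySem.List.pyGetD board i []) j 0]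
        else st) []
      = colAbs (board.map (fun row => PySem.List.pyGetD row j 0)) := by
  have hrev : PySem.List.pyRange ((board.length : Int) - 1) (-1) (-1)
      = (PySem.List.pyRange 0 (board.length : Int) 1).reverse := by
    simpa using PySem.List.pyRange_neg_one_eq_reverse ((board.length : Int) - 1) (-1)
  set colB := board.map (fun row => PySem.List.pyGetD row j 0) with hcolB
  have hmap : (PySem.List.pyRange 0 (board.length : Int) 1).map
      (fun i => PySem.List.pyGetD colB i 0) = colB := by
    have := PySem.List.map_pyGetD_pyRange_zero' colB 0
    simpa [hcolB] using this
  have hcong : ∀ st : List Int, ∀ i ∈ (PySem.List.pyRange 0 (board.length : Int) 1).reverse,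
      (if PySem.List.pyGetD (PySem.List.pyGetD board i []) j 0 ≠ 0 then
          st ++ [PySem.List.pyGetD (PySem.List.pyGetD board i []) j 0] else st)
      = (if PySem.List.pyGetD colB i 0 ≠ 0 then st ++ [PySem.List.pyGetD colB i 0] else st) := by
    intro st i hi
    rw [List.mem_reverse, PySem.List.mem_pyRange_one] at hi
    have hv : PySem.List.pyGetD colB i 0 = PySem.List.pyGetD (PySem.List.pyGetD board i []) j 0 := by
      rw [PySem.List.pyGetD_of_nonneg _ _ hi.1, PySem.List.pyGetD_of_nonneg _ _ hi.1]
      have hlt : i.toNat < board.length := by omega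
      simp [hcolB, List.getD, hlt]
    rw [hv]
  rw [hrev, PySem.List.foldl_congr_mem _ _ _ _ hcong]
  have h2 : colB.reverse.foldl (fun st x => if x ≠ 0 then st ++ [x] else st) []
      = (PySem.List.pyRange 0 (board.length : Int) 1).reverse.foldl
        (fun st i => if PySem.List.pyGetD colB i 0 ≠ 0 then st ++ [PySem.List.pyGetD colB i 0] else st) [] := by
    conv_lhs => rw [← hmap]
    rw [← List.map_reverse, List.foldl_map]
  rw [← h2, PySem.List.foldl_append_ite_eq_filter, List.filter_reverse]
  rfl


-- the whole move loop
lemma loop_eq (moves : List Int) (cols : List (List Int)) (basket : List Int) (ans : Int)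
    (hmv : ∀ mv ∈ moves, 1 - (cols.length : Int) ≤ mv ∧ mv ≤ (cols.length : Int))
    (hch : basket.IsChain (· ≠ ·)) :
    (moves.foldl stepA (cols.map colAbs, basket, ans)).2.2
      = (moves.foldl stepB (cols, basket, ans)).2.2 := by
  induction moves generalizing cols basket ans with
  | nil => rfl
  | cons mv rest ih =>
    obtain ⟨he, hc, hl⟩ := step_eq cols basket ans mv (hmv mv (by simp)) hch
    simp only [List.foldl_cons, he]
    have := ih (stepB (cols, basket, ans) mv).1 (stepB (cols, basket, ans) mv).2.1
      (stepB (cols, basket, ans) mv).2.2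
      (fun x hx => by rw [hl]; exact hmv x (by simp [hx])) hc
    simpa using this

-- ===== VERDICT (by name: the statement is the Claim_ definition above) =====
theorem solution_spec : Claim_equal_solution := by
  intro board moves _ hpre
  obtain ⟨hne, _hrows, hmv⟩ := hpre
  unfold Spec_solution solution solution_alt
  simp only
  have hm : ((PySem.List.pyGetD board 0 []).length : Int) = ((board.headD []).length : Int) := by
    cases board with
    | nil => exact absurd rfl hne
    | cons r t => simp [PySem.List.pyGetD]
  have hinit :
      (PySem.List.pyRange 0 ((PySem.List.pyGetD board 0 []).length : Int) 1).map (fun j =>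
        (PySem.List.pyRange ((board.length : Int) - 1) (-1) (-1)).foldl (fun st i =>
          if PySem.List.pyGetD (PySem.List.pyGetD board i []) j 0 ≠ 0 then
            st ++ [PySem.List.pyGetD (PySem.List.pyGetD board i []) j 0]
          else st) [])
      = ((PySem.List.pyRange 0 ((PySem.List.pyGetD board 0 []).length : Int) 1).map (fun j =>
          board.map (fun row => PySem.List.pyGetD row j 0))).map colAbs := by
    rw [List.map_map]
    exact List.map_congr_left (fun j _ => init_col_eq board j)
  rw [hinit]
  apply loop_eq
  · intro mv h
    constructor
    · have := (hmv mv h).1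
      simpa [PySem.List.length_pyRange_one, hm] using this
    · simpa [PySem.List.length_pyRange_one, hm] using (hmv mv h).2
  · exact List.IsChain.nil
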